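-- pv_equiv track=rewrite | github.com/jobobert/Delve | engine/toml_io.py | _open_brackets
-- ===== SOURCE A (Python) =====
-- def _open_brackets(s: str) -> int:
--     """Count unclosed [ and { brackets in a string (respects strings)."""
--     depth = 0
--     in_str = False
--     sc = ""
--     for i, c in enumerate(s):
--         if in_str:
--             if c == "\\" :
--                 continue
--             if c == sc:
--                 in_str = False
--         elif c in ('"', "'"):
--             in_str, sc = True, c
--         elif c in ("[", "{"):
--             depth += 1
--         elif c in ("]", "}"):
--             depth -= 1
--     return depth
-- ===== SOURCE B (Python) =====
-- def _balance(chunk):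
--     return chunk.count('[') + chunk.count('{') - chunk.count(']') - chunk.count('}')
--
--
-- def _open_brackets(s: str) -> int:
--     """Count unclosed [ and { brackets: strip string literals chunk by chunk, then count."""
--     total = 0
--     rest = s
--     while True:
--         j = next((k for k, c in enumerate(rest) if c in ('"', "'")), None)
--         if j is None:
--             return total + _balance(rest)
--         total += _balance(rest[:j])
--         q = rest[j]
--         tail = rest[j + 1:]
--         e = next((k for k, c in enumerate(tail) if c == q), None)
--         if e is None:
--             return total
--         rest = tail[e + 1:]
-- ===== Notes on version B (the rewrite author's own statement) =====
-- stated objective: alternative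
-- what changed: A is a single character-by-character scan carrying (depth, in_str, quote-char) state; B strips string literals by jumping from quote to matching quote with enumerate/find and sums str.count bracket balances of the chunks outside literals.
import Mathlib
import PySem

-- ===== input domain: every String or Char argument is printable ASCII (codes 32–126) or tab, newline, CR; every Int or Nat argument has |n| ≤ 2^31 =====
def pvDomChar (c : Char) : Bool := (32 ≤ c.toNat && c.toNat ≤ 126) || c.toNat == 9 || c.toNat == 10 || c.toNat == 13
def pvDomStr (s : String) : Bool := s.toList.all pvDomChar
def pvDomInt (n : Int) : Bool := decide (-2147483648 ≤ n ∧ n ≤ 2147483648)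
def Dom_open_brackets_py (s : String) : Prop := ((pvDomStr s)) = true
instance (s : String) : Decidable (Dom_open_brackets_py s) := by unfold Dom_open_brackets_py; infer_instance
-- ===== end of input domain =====

-- B replaces A's single stateful character scan by a strip-then-count decomposition
-- (jump from quote to quote, count brackets only in the chunks outside string literals); objective: simpler.

-- ===== PORT A =====
-- state = (depth, in_str, sc); Python's initial sc is the never-read "" (read only when
-- in_str is true, by which time sc holds a quote char), so a dummy ' ' is exact.
def obAStep (st : Int × Bool × Char) (c : Char) : Int × Bool × Char :=
  let (depth, in_str, sc) := st
  if in_str then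
    if c = '\\' then (depth, in_str, sc)        -- 'continue'
    else if c = sc then (depth, false, sc)
    else (depth, in_str, sc)
  else if c = '"' ∨ c = '\'' then (depth, true, c)
  else if c = '[' ∨ c = '{' then (depth + 1, in_str, sc)
  else if c = ']' ∨ c = '}' then (depth - 1, in_str, sc)
  else (depth, in_str, sc)

def open_brackets_py (s : String) : Int :=
  (s.toList.foldl obAStep (0, false, ' ')).1

-- ===== PORT B =====
-- chunk.count('[') for a single-character substring is exactly List.count on the code points.
def obBalance (chunk : List Char) : Int :=
  (chunk.count '[' : Int) + (chunk.count '{' : Int)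
    - (chunk.count ']' : Int) - (chunk.count '}' : Int)

-- the 'while True' loop of Source B; rest[:j] / rest[j+1:] with j a nonnegative enumerate
-- index are List.take / List.drop; rest[j] is in range, so getD is exact.
def obBLoop (total : Int) (rest : List Char) : Int :=
  match hfq : rest.findIdx? (fun c => c == '"' || c == '\'') with
  | none => total + obBalance rest
  | some j =>
    let total' := total + obBalance (rest.take j)
    let q := rest.getD j ' '
    let tail := rest.drop (j + 1)
    match tail.findIdx? (fun c => c == q) with
    | none => total'
    | some e => obBLoop total' (tail.drop (e + 1))
termination_by rest.length
decreasing_by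
  have hjlt : j < rest.length := (List.findIdx?_eq_some_iff_findIdx_eq.mp hfq).1
  simp only [List.length_drop]
  omega

def open_brackets_py_alt (s : String) : Int :=
  obBLoop 0 s.toList

-- ===== PRECONDITION & SPEC =====
def Spec_open_brackets_py (s : String) (out : Int) : Prop := out = open_brackets_py_alt s
instance (s : String) (out : Int) : Decidable (Spec_open_brackets_py s out) := by unfold Spec_open_brackets_py; infer_instance

-- ===== CLAIM (what is proved, stated in full; the proofs are below) =====
def Claim_equal_open_brackets_py : Prop := ∀ (s : String), Dom_open_brackets_py s → Spec_open_brackets_py s (open_brackets_py s)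

-- ===== LEMMAS AND PROOFS =====

-- A's scan over a chunk with no quote chars just adds the chunk's bracket balance.
theorem obAStep_no_quote (l : List Char) (d : Int) (sc : Char)
    (h : ∀ c ∈ l, ¬(c == '"' || c == '\'') = true) :
    l.foldl obAStep (d, false, sc) = (d + obBalance l, false, sc) := by
  induction l generalizing d with
  | nil => simp [obBalance]
  | cons c t ih =>
    have hc := h c (by simp)
    simp only [Bool.or_eq_true, beq_iff_eq, not_or] at hc
    simp only [List.foldl_cons]
    by_cases h1 : c = '[' ∨ c = '{'
    · rw [show obAStep (d, false, sc) c = (d + 1, false, sc) by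
        simp [obAStep, hc.1, hc.2]; rcases h1 with h1 | h1 <;> simp [h1]]
      rw [ih _ (fun x hx => h x (by simp [hx]))]
      have : obBalance (c :: t) = obBalance t + 1 := by
        rcases h1 with h1 | h1 <;> subst h1 <;>
          simp [obBalance] <;> ring
      rw [this]; ring_nf
    · by_cases h2 : c = ']' ∨ c = '}'
      · rw [show obAStep (d, false, sc) c = (d - 1, false, sc) by
          simp [obAStep, hc.1, hc.2]; rcases h2 with h2 | h2 <;> simp [h2]]
        rw [ih _ (fun x hx => h x (by simp [hx]))]
        have : obBalance (c :: t) = obBalance t - 1 := by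
          rcases h2 with h2 | h2 <;> subst h2 <;>
            simp [obBalance] <;> ring
        rw [this]; ring_nf
      · simp only [not_or] at h1 h2
        rw [show obAStep (d, false, sc) c = (d, false, sc) by
          simp [obAStep, hc.1, hc.2, h1.1, h1.2, h2.1, h2.2]]
        rw [ih _ (fun x hx => h x (by simp [hx]))]
        have : obBalance (c :: t) = obBalance t := by
          simp [obBalance, h1.1, h1.2, h2.1, h2.2]
        rw [this]

-- A's scan while inside a string literal: skip up to and including the closing quote;
-- if the literal is unterminated, the state never leaves (d, true, q).
theorem obAStep_in_str (l : List Char) (d : Int) (q : Char) (hq : q ≠ '\\') :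
    l.foldl obAStep (d, true, q) =
      match l.findIdx? (fun c => c == q) with
      | none => (d, true, q)
      | some e => (l.drop (e + 1)).foldl obAStep (d, false, q) := by
  induction l with
  | nil => simp
  | cons c t ih =>
    by_cases hc : c = q
    · subst hc
      simp [List.findIdx?_cons, obAStep, hq]
    · have hstep : obAStep (d, true, q) c = (d, true, q) := by
        by_cases hb : c = '\\' <;> simp [obAStep, hb, hc]
      simp only [List.foldl_cons, hstep, List.findIdx?_cons, beq_iff_eq, hc, ite_false]
      rw [ih]
      cases htl : t.findIdx? (fun c => c == q) <;> simp

-- after the quote-free prefix and the opening quote at index j, A's scan is in-string.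
theorem obAStep_prefix (rest : List Char) (j : Nat) (total : Int) (sc : Char)
    (hfq : rest.findIdx? (fun c => c == '"' || c == '\'') = some j) :
    rest.foldl obAStep (total, false, sc) =
      (rest.drop (j + 1)).foldl obAStep
        (total + obBalance (rest.take j), true, rest.getD j ' ') := by
  obtain ⟨hlt, hpj, hprior⟩ := List.findIdx?_eq_some_iff_getElem.mp hfq
  have hsplit : rest = rest.take j ++ rest[j] :: rest.drop (j + 1) := by
    conv_lhs => rw [← List.take_append_drop j rest]
    rw [List.drop_eq_getElem_cons hlt]
  have hnq : ∀ c ∈ rest.take j, ¬(c == '"' || c == '\'') = true := by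
    intro c hc
    obtain ⟨i, hi, rfl⟩ := List.mem_iff_getElem.mp hc
    have hij : i < j := by
      have := hi; simp only [List.length_take] at this; omega
    rw [List.getElem_take]
    exact hprior i hij
  have hq : rest[j] = '"' ∨ rest[j] = '\'' := by
    simpa using hpj
  have hstep : obAStep (total + obBalance (rest.take j), false, sc) rest[j]
      = (total + obBalance (rest.take j), true, rest[j]) := by
    rcases hq with h | h <;> simp [obAStep, h]
  conv_lhs => rw [hsplit]
  rw [List.foldl_append, obAStep_no_quote _ _ _ hnq, List.foldl_cons, hstep,
    List.getD_eq_getElem rest ' ' hlt]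

theorem obBLoop_eq (total : Int) (rest : List Char) :
    ∀ sc, obBLoop total rest = (rest.foldl obAStep (total, false, sc)).1 := by
  induction total, rest using obBLoop.induct with
  | case1 total rest hfq =>
    intro sc
    have hnq : ∀ c ∈ rest, ¬(c == '"' || c == '\'') = true := by
      intro c hcmem
      simp [List.findIdx?_eq_none_iff.mp hfq c hcmem]
    rw [obBLoop.eq_def]
    split
    · rw [obAStep_no_quote _ _ _ hnq]
    · exfalso; rename_i j heq; rw [hfq] at heq; cases heq
  | case2 total rest j hfq q tail hinner =>
    intro sc
    have hlt := (List.findIdx?_eq_some_iff_getElem.mp hfq).1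
    have hgd : rest.getD j ' ' = rest[j] := List.getD_eq_getElem rest ' ' hlt
    have hq : rest[j]'hlt = '"' ∨ rest[j]'hlt = '\'' := by
      simpa using (List.findIdx?_eq_some_iff_getElem.mp hfq).2.1
    have hqne : rest[j]'hlt ≠ '\\' := by
      rcases hq with h | h <;> simp [h]
    have hqd : q = rest[j] := hgd
    have htd : tail = rest.drop (j + 1) := rfl
    simp only [hqd, htd] at hinner
    rw [obBLoop.eq_def]
    split
    · exfalso; rename_i heq; rw [hfq] at heq; cases heq
    · rename_i j' heq; rw [hfq] at heq; injection heq with hj; subst hj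
      dsimp only
      split
      · rw [obAStep_prefix rest j total sc hfq, hgd, obAStep_in_str _ _ _ hqne]
        simp only [hinner]
      · exfalso; rename_i e heq2; simp only [hgd] at heq2
        rw [hinner] at heq2; cases heq2
  | case3 total rest j hfq total' q tail e hinner ih =>
    intro sc
    have hlt := (List.findIdx?_eq_some_iff_getElem.mp hfq).1
    have hgd : rest.getD j ' ' = rest[j] := List.getD_eq_getElem rest ' ' hlt
    have hq : rest[j]'hlt = '"' ∨ rest[j]'hlt = '\'' := by
      simpa using (List.findIdx?_eq_some_iff_getElem.mp hfq).2.1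
    have hqne : rest[j]'hlt ≠ '\\' := by
      rcases hq with h | h <;> simp [h]
    have hqd : q = rest[j] := hgd
    have htd : tail = rest.drop (j + 1) := rfl
    simp only [hqd, htd] at hinner
    rw [obBLoop.eq_def]
    split
    · exfalso; rename_i heq; rw [hfq] at heq; cases heq
    · rename_i j' heq; rw [hfq] at heq; injection heq with hj; subst hj
      dsimp only
      split
      · exfalso; rename_i heq2; simp only [hgd] at heq2
        rw [hinner] at heq2; cases heq2
      · rename_i e' heq2; simp only [hgd] at heq2
        rw [hinner] at heq2; injection heq2 with he; subst he
        rw [obAStep_prefix rest j total sc hfq, hgd, obAStep_in_str _ _ _ hqne]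
        simp only [hinner]
        exact ih rest[j]

-- ===== VERDICT (by name: the statement is the Claim_ definition above) =====
theorem open_brackets_py_spec : Claim_equal_open_brackets_py := by
  intro s _
  unfold Spec_open_brackets_py open_brackets_py open_brackets_py_alt
  exact (obBLoop_eq 0 s.toList ' ').symm
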